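-- pv_equiv track=rewrite | github.com/SFshr/procedurally-generated-poetry | main.py | wordposition_collapsed
-- ===== SOURCE A (Python) =====
-- def wordposition_collapsed(wordconstraint):
--     populatedclasscount = 0
--     for classcon in wordconstraint:
--         if len(classcon)>1:
--             return False
--         elif len(classcon)==1:
--             populatedclasscount += 1
--     if populatedclasscount > 1:
--         return False
--     return True
-- ===== SOURCE B (Python) =====
-- def wordposition_collapsed(wordconstraint):
--     return sum(len(c) for c in wordconstraint) <= 1
-- ===== Notes on version B (the rewrite author's own statement) =====
-- stated objective: simpler
-- what changed: Replaced the per-class case analysis (early return on a multi-element class, counter of singleton classes) with a single arithmetic reduction: the constraint is collapsed iff the total number of elements across all classes is at most 1.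
import Mathlib
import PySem

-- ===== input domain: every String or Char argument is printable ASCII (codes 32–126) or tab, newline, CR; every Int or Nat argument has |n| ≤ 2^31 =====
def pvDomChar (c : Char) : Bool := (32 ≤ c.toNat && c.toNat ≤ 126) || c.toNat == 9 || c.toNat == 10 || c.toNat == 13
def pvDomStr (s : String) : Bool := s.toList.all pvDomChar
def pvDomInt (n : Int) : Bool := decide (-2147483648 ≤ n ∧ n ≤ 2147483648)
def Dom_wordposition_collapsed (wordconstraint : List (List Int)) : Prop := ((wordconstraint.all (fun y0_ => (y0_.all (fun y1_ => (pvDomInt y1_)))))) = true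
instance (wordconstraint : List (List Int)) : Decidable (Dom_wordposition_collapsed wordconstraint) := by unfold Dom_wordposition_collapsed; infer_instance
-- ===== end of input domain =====

-- B replaces A's per-class case analysis with one arithmetic reduction (total element count ≤ 1); objective: simpler.

-- ===== PORT A =====
-- A's loop with early return and a counter of singleton classes, as structural recursion
def wpGoA : List (List Int) → Int → Bool
  | [], cnt => !decide (cnt > 1)
  | classcon :: rest, cnt =>
    if classcon.length > 1 then false
    else if classcon.length == 1 then wpGoA rest (cnt + 1)
    else wpGoA rest cnt

def wordposition_collapsed (wordconstraint : List (List Int)) : Bool :=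
  wpGoA wordconstraint 0

-- ===== PORT B =====
-- B: sum of the class lengths, compared with 1
def wordposition_collapsed_alt (wordconstraint : List (List Int)) : Bool :=
  decide ((wordconstraint.map (fun c => (c.length : Int))).sum ≤ 1)

-- ===== PRECONDITION & SPEC =====
def Spec_wordposition_collapsed (wordconstraint : List (List Int)) (out : Bool) : Prop := out = wordposition_collapsed_alt wordconstraint
instance (wordconstraint : List (List Int)) (out : Bool) : Decidable (Spec_wordposition_collapsed wordconstraint out) := by unfold Spec_wordposition_collapsed; infer_instance

-- ===== CLAIM (what is proved, stated in full; the proofs are below) =====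
def Claim_equal_wordposition_collapsed : Prop := ∀ (wordconstraint : List (List Int)), Dom_wordposition_collapsed wordconstraint → Spec_wordposition_collapsed wordconstraint (wordposition_collapsed wordconstraint)

-- ===== LEMMAS AND PROOFS =====
lemma wpGoA_eq (l : List (List Int)) : ∀ cnt : Int, 0 ≤ cnt →
    wpGoA l cnt = decide (cnt + (l.map (fun c => (c.length : Int))).sum ≤ 1) := by
  induction l with
  | nil =>
    intro cnt _
    by_cases h : cnt ≤ 1
    · have h' : ¬ cnt > 1 := by omega
      simp [wpGoA, h, h']
    · have h' : cnt > 1 := by omega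
      simp [wpGoA, h, h']
  | cons c rest ih =>
    intro cnt hcnt
    by_cases h1 : c.length > 1
    · have hsum : (0:Int) ≤ (rest.map (fun c => (c.length : Int))).sum := by
        apply List.sum_nonneg; intro x hx
        simp only [List.mem_map] at hx
        obtain ⟨y, _, rfl⟩ := hx; positivity
      have : ¬ (cnt + ((c.length : Int) + (rest.map (fun c => (c.length : Int))).sum) ≤ 1) := by
        push_cast; omega
      simp [wpGoA, h1, this]
    · by_cases h0 : c.length = 1
      · rw [show wpGoA (c :: rest) cnt = wpGoA rest (cnt + 1) by simp [wpGoA, h0],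
          ih (cnt + 1) (by omega)]
        simp [h0]
        constructor <;> (intro ; omega)
      · have hlen : c.length = 0 := by omega
        rw [show wpGoA (c :: rest) cnt = wpGoA rest cnt by simp [wpGoA, hlen], ih cnt hcnt]
        simp [hlen]

-- ===== VERDICT (by name: the statement is the Claim_ definition above) =====
theorem wordposition_collapsed_spec : Claim_equal_wordposition_collapsed := by
  intro wc _
  show _ = _
  rw [wordposition_collapsed, wordposition_collapsed_alt, wpGoA_eq wc 0 le_rfl]
  simp
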